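-- pv_equiv track=rewrite | github.com/AdamZhouSE/pythonHomework | Code/CodeRecords/2860/39200/306037.py | removeequal
-- ===== SOURCE A (Python) =====
-- def removeequal(nums, xi, yi):
--     i = 0
--     flag = 0
--     while i < len(nums):
--         if int(nums[i][0]) in xi or int(nums[i][1]) in yi:
--             if int(nums[i][0]) not in xi:
--                 xi.append(int(nums[i][0]))
--             if int(nums[i][1]) not in yi:
--                 yi.append(int(nums[i][1]))
--             nums.pop(i)
--             flag = 1
--         else:
--             i += 1
--     while flag and len(nums) > 0:
--         flag = removeequal(nums, xi, yi)
--     return flag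
-- ===== SOURCE B (Python) =====
-- def removeequal(nums, xi, yi):
--     # Iterative fixed point: each pass rebuilds the kept rows in one sweep
--     # (no index/pop bookkeeping, no recursion); absorbed rows feed xi/yi as found.
--     if not nums:
--         return 0
--     while True:
--         changed = False
--         kept = []
--         for row in nums:
--             if row[0] in xi or row[1] in yi:
--                 if row[0] not in xi:
--                     xi.append(row[0])
--                 if row[1] not in yi:
--                     yi.append(row[1])
--                 changed = True
--             else:
--                 kept.append(row)
--         nums[:] = kept
--         if not changed:
--             return 0
--         if not nums:
--             return 1
-- ===== Notes on version B (the rewrite author's own statement) =====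
-- stated objective: simpler
-- what changed: Replaces A's index/pop in-place scan plus recursion-driven while fixed point by a plain iterative loop that rebuilds the kept rows in one sweep per pass and returns from emptiness/no-change directly.
import Mathlib
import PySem

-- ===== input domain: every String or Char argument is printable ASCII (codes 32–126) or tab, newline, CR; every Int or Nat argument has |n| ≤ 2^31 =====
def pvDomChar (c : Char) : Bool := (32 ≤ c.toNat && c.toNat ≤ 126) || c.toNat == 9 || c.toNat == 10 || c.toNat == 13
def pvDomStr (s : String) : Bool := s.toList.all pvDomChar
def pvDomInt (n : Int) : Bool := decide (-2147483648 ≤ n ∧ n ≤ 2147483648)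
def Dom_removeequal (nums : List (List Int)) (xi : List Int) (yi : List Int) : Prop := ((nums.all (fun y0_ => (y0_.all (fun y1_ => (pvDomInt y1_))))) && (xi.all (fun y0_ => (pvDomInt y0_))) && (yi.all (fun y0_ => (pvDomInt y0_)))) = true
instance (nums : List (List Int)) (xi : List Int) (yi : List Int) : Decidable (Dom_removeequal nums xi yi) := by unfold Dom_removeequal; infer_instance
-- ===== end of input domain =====

-- B replaces A's index/pop scan and recursion-driven fixed point by an iterative
-- loop that rebuilds the kept rows in one sweep per pass (objective: simpler).
-- Both Pythons mutate nums/xi/yi identically; the theorems are about the return value.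

-- ===== PORT A =====
-- A's inner while-loop: state (nums, i, xi, yi, flag); nums.pop(i) or i += 1.
-- row[0]/row[1] are ported with pyGetD (Python raises IndexError on rows shorter
-- than 2; those inputs are excluded by Pre_removeequal).
def passA (nums : List (List Int)) (i : Nat) (xi yi : List Int) (flag : Int) :
    List (List Int) × List Int × List Int × Int :=
  if h : i < nums.length then
    let x := PySem.List.pyGetD nums[i] 0 0
    let y := PySem.List.pyGetD nums[i] 1 0
    if x ∈ xi ∨ y ∈ yi then
      let xi' := if x ∉ xi then xi ++ [x] else xi
      let yi' := if y ∉ yi then yi ++ [y] else yi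
      passA (nums.eraseIdx i) i xi' yi' 1
    else
      passA nums (i + 1) xi yi flag
  else (nums, xi, yi, flag)
termination_by nums.length - i
decreasing_by
  · have := List.length_eraseIdx_of_lt h; omega
  · omega

-- A's recursive call `flag = removeequal(nums, xi, yi)` inside
-- `while flag and len(nums) > 0`, with the mutated state threaded explicitly;
-- fuel is only a totality guard (2*length+2 always suffices, proved below).
mutual
def goA : Nat → List (List Int) → List Int → List Int →
    List (List Int) × List Int × List Int × Int
  | 0, nums, xi, yi => (nums, xi, yi, 0)
  | f + 1, nums, xi, yi => whileA f (passA nums 0 xi yi 0)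

def whileA : Nat → (List (List Int) × List Int × List Int × Int) →
    List (List Int) × List Int × List Int × Int
  | 0, s => s
  | f + 1, (n, x, y, fl) =>
      if fl ≠ 0 ∧ n ≠ [] then whileA f (goA f n x y) else (n, x, y, fl)
end

def removeequal (nums : List (List Int)) (xi : List Int) (yi : List Int) : Int :=
  (goA (2 * nums.length + 2) nums xi yi).2.2.2

-- ===== PORT B =====
-- One `for row in nums` sweep of Source B, building `kept` and threading changed/xi/yi.
def passB (rows kept : List (List Int)) (xi yi : List Int) (changed : Bool) :
    List (List Int) × List Int × List Int × Bool :=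
  match rows with
  | [] => (kept, xi, yi, changed)
  | row :: rest =>
      let x := PySem.List.pyGetD row 0 0
      let y := PySem.List.pyGetD row 1 0
      if x ∈ xi ∨ y ∈ yi then
        let xi' := if x ∉ xi then xi ++ [x] else xi
        let yi' := if y ∉ yi then yi ++ [y] else yi
        passB rest kept xi' yi' true
      else
        passB rest (kept ++ [row]) xi yi changed

-- Source B's `while True` loop; fuel is only a totality guard (length+1 suffices).
def goB : Nat → List (List Int) → List Int → List Int → Int
  | 0, _, _, _ => 0
  | f + 1, nums, xi, yi =>
      let s := passB nums [] xi yi false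
      if s.2.2.2 = false then 0
      else if s.1 = [] then 1
      else goB f s.1 s.2.1 s.2.2.1

def removeequal_alt (nums : List (List Int)) (xi : List Int) (yi : List Int) : Int :=
  if nums = [] then 0 else goB (nums.length + 1) nums xi yi

-- ===== PRECONDITION & SPEC =====
-- Pre_ excludes exactly the inputs where Python A raises IndexError: a row with
-- fewer than two entries is always reached and indexed by A's scan.
def Pre_removeequal (nums : List (List Int)) (xi : List Int) (yi : List Int) : Prop :=
  ∀ row ∈ nums, 2 ≤ row.length
instance (nums : List (List Int)) (xi : List Int) (yi : List Int) : Decidable (Pre_removeequal nums xi yi) := by unfold Pre_removeequal; infer_instance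

def pvWitness_removeequal : List (List Int) × List Int × List Int :=
  ([[1, 2], [3, 4], [5, 2]], [1], [9])

def Spec_removeequal (nums : List (List Int)) (xi : List Int) (yi : List Int) (out : Int) : Prop := out = removeequal_alt nums xi yi
instance (nums : List (List Int)) (xi : List Int) (yi : List Int) (out : Int) : Decidable (Spec_removeequal nums xi yi out) := by unfold Spec_removeequal; infer_instance

-- ===== CLAIM (what is proved, stated in full; the proofs are below) =====
def Claim_equal_removeequal : Prop := ∀ (nums : List (List Int)) (xi : List Int) (yi : List Int), Dom_removeequal nums xi yi → Pre_removeequal nums xi yi → Spec_removeequal nums xi yi (removeequal nums xi yi)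

-- ===== LEMMAS AND PROOFS =====

-- `changed` is only threaded through passB: passing `true` leaves everything
-- but the final flag untouched.
theorem passB_true (rest : List (List Int)) : ∀ (kept : List (List Int)) (xi yi : List Int),
    passB rest kept xi yi true =
      ((passB rest kept xi yi false).1, (passB rest kept xi yi false).2.1,
       (passB rest kept xi yi false).2.2.1, true) := by
  induction rest with
  | nil => intro kept xi yi; simp [passB]
  | cons row rest ih =>
      intro kept xi yi
      simp only [passB]
      by_cases h : PySem.List.pyGetD row 0 0 ∈ xi ∨ PySem.List.pyGetD row 1 0 ∈ yi
      · rw [if_pos h, if_pos h, ih]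
      · rw [if_neg h, if_neg h, ih]

-- A's pop-based scan, started at index |kept| over kept ++ rest, computes
-- B's sweep over rest (with accumulator kept), the flag becoming 1 on change.
theorem passA_eq (rest : List (List Int)) : ∀ (kept : List (List Int)) (xi yi : List Int) (flag : Int),
    passA (kept ++ rest) kept.length xi yi flag =
      ((passB rest kept xi yi false).1, (passB rest kept xi yi false).2.1,
       (passB rest kept xi yi false).2.2.1,
       if (passB rest kept xi yi false).2.2.2 then 1 else flag) := by
  induction rest with
  | nil =>
      intro kept xi yi flag
      rw [passA]
      simp [passB]
  | cons row rest ih =>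
      intro kept xi yi flag
      rw [passA]
      have hlt : kept.length < (kept ++ row :: rest).length := by simp
      have hget : (kept ++ row :: rest)[kept.length]'hlt = row := by
        simp [List.getElem_append_right]
      have herase : (kept ++ row :: rest).eraseIdx kept.length = kept ++ rest := by
        induction kept with
        | nil => rfl
        | cons a k ihk => simpa using ihk
      rw [dif_pos hlt]
      simp only [hget, herase]
      simp only [passB]
      by_cases h : PySem.List.pyGetD row 0 0 ∈ xi ∨ PySem.List.pyGetD row 1 0 ∈ yi
      · rw [if_pos h, if_pos h, ih, passB_true]
        simp
      · rw [if_neg h, if_neg h]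
        have e2 : kept.length + 1 = (kept ++ [row]).length := by simp
        have e1 : kept ++ row :: rest = (kept ++ [row]) ++ rest := by simp
        rw [e2, e1, ih]

-- A sweep never grows the kept list beyond the rows it has seen.
theorem passB_length_le (rest : List (List Int)) : ∀ (kept : List (List Int)) (xi yi : List Int) (b : Bool),
    (passB rest kept xi yi b).1.length ≤ kept.length + rest.length := by
  induction rest with
  | nil => intro kept xi yi b; simp [passB]
  | cons row rest ih =>
      intro kept xi yi b
      simp only [passB]
      by_cases h : PySem.List.pyGetD row 0 0 ∈ xi ∨ PySem.List.pyGetD row 1 0 ∈ yi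
      · rw [if_pos h]
        exact le_trans (ih kept _ _ true) (by simp)
      · rw [if_neg h]
        have := ih (kept ++ [row]) xi yi b
        simp at this ⊢
        omega

-- A sweep that reports a change strictly shrinks the row list.
theorem passB_length_lt (rest : List (List Int)) : ∀ (kept : List (List Int)) (xi yi : List Int),
    (passB rest kept xi yi false).2.2.2 = true →
    (passB rest kept xi yi false).1.length < kept.length + rest.length := by
  induction rest with
  | nil => intro kept xi yi hc; simp [passB] at hc
  | cons row rest ih =>
      intro kept xi yi hc
      simp only [passB] at hc ⊢
      by_cases h : PySem.List.pyGetD row 0 0 ∈ xi ∨ PySem.List.pyGetD row 1 0 ∈ yi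
      · rw [if_pos h]
        have := passB_length_le rest kept
          (if PySem.List.pyGetD row 0 0 ∉ xi then xi ++ [PySem.List.pyGetD row 0 0] else xi)
          (if PySem.List.pyGetD row 1 0 ∉ yi then yi ++ [PySem.List.pyGetD row 1 0] else yi) true
        simp only [List.length_cons]
        omega
      · rw [if_neg h] at hc ⊢
        have := ih (kept ++ [row]) xi yi hc
        simp at this ⊢
        omega

-- whileA is the identity on a state whose flag is 0 or whose list is empty.
theorem whileA_id (f : Nat) (s : List (List Int) × List Int × List Int × Int)
    (h : s.2.2.2 = 0 ∨ s.1 = []) : whileA f s = s := by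
  obtain ⟨n, x, y, fl⟩ := s
  cases f with
  | zero => rfl
  | succ f =>
      simp only [whileA]
      rw [if_neg]
      rintro ⟨h1, h2⟩
      rcases h with h | h
      · exact h1 h
      · exact h2 h

-- Main fuel/equivalence lemma: with enough fuel, goA's flag is goB's result,
-- and goA only ends with a nonzero flag when nums has been emptied.
theorem goA_eq_goB (n : Nat) : ∀ (nums : List (List Int)) (xi yi : List Int) (f g : Nat),
    nums.length ≤ n → 2 * n + 1 ≤ f → n + 1 ≤ g → nums ≠ [] →
    (goA f nums xi yi).2.2.2 = goB g nums xi yi ∧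
      ((goA f nums xi yi).2.2.2 = 0 ∨ (goA f nums xi yi).1 = []) := by
  induction n using Nat.strong_induction_on with
  | _ n ih =>
    intro nums xi yi f g hn hf hg hne
    obtain ⟨f', rfl⟩ : ∃ f', f = f' + 1 := ⟨f - 1, by omega⟩
    obtain ⟨g', rfl⟩ : ∃ g', g = g' + 1 := ⟨g - 1, by omega⟩
    have hA : goA (f' + 1) nums xi yi = whileA f' (passA nums 0 xi yi 0) := rfl
    have hpass : passA nums 0 xi yi 0 =
        ((passB nums [] xi yi false).1, (passB nums [] xi yi false).2.1,
         (passB nums [] xi yi false).2.2.1,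
         if (passB nums [] xi yi false).2.2.2 then 1 else 0) := by
      have := passA_eq nums [] xi yi 0
      simpa using this
    set s := passB nums [] xi yi false with hs
    by_cases hc : s.2.2.2 = true
    · by_cases hk : s.1 = []
      · -- changed pass emptied nums: flag 1, both return 1
        have hres : goA (f' + 1) nums xi yi = (s.1, s.2.1, s.2.2.1, 1) := by
          rw [hA, hpass, hc]
          simp only [if_true]
          exact whileA_id _ _ (Or.inr hk)
        rw [hres]
        refine ⟨?_, Or.inr hk⟩
        simp only [goB, ← hs, hc]
        simp [hk]
      · -- changed pass, nums left over: A recurses, B loops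
        have hlen : s.1.length < nums.length := by
          have := passB_length_lt nums [] xi yi (hs ▸ hc)
          simpa [← hs] using this
        have hn1 : 0 < nums.length := List.length_pos_iff.mpr hne
        obtain ⟨f'', rfl⟩ : ∃ f'', f' = f'' + 1 := ⟨f' - 1, by omega⟩
        have hstep : goA (f'' + 1 + 1) nums xi yi = whileA f'' (goA f'' s.1 s.2.1 s.2.2.1) := by
          rw [hA, hpass, hc]
          simp only [if_true]
          show whileA (f'' + 1) (s.1, s.2.1, s.2.2.1, 1) = _
          simp only [whileA]
          rw [if_pos ⟨one_ne_zero, hk⟩]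
        have hrec := ih (n - 1) (by omega) s.1 s.2.1 s.2.2.1 f'' g'
          (by omega) (by omega) (by omega) hk
        have hwid : whileA f'' (goA f'' s.1 s.2.1 s.2.2.1) = goA f'' s.1 s.2.1 s.2.2.1 :=
          whileA_id _ _ hrec.2
        rw [hstep, hwid]
        refine ⟨?_, hrec.2⟩
        rw [hrec.1]
        simp only [goB, ← hs, hc]
        simp [hk]
    · -- no change: flag stays 0, both return 0
      have hc0 : s.2.2.2 = false := by simpa using hc
      have hres : goA (f' + 1) nums xi yi = (s.1, s.2.1, s.2.2.1, 0) := by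
        rw [hA, hpass, hc0]
        simp only [Bool.false_eq_true, if_false]
        exact whileA_id _ _ (Or.inl rfl)
      rw [hres]
      refine ⟨?_, Or.inl rfl⟩
      simp [goB, ← hs, hc0]

-- ===== VERDICT (by name: the statement is the Claim_ definition above) =====
theorem removeequal_spec : Claim_equal_removeequal := by
  intro nums xi yi _ _
  unfold Spec_removeequal removeequal removeequal_alt
  by_cases hne : nums = []
  · subst hne
    show (whileA _ (passA [] 0 xi yi 0)).2.2.2 = 0
    rw [passA]
    simp [whileA_id]
  · rw [if_neg hne]
    exact (goA_eq_goB nums.length nums xi yi _ _ (le_refl _) (by omega) (le_refl _) hne).1
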